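-- pv_equiv track=rewrite | github.com/pogrebitskiy/ReceipTrack | Food_Identification.py | abbreviations
-- ===== SOURCE A (Python) =====
-- from itertools import chain, combinations
--
-- def abbreviations(food):
--     """ creates a list of possible abbreviations for a food
--     :param food: a string that is the name of a food
--     :return abbreviations: a list of possible abbreviations for that food
--     """
--     # create a list of vowels
--     vowel_list = ["a", "e", "i", "o", "u"]
--
--     # pull out all vowels in the word
--     vowels = [char for char in food if char in vowel_list]
--
--     # get all combinations of these vowels
--     vowel_combos = list(chain.from_iterable(combinations(vowels, r) for r in range(len(vowels) + 1)))
--     vowel_combos = [combo for combo in vowel_combos if len(combo) <= 2]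
--
--     abbrev_options = []
--     for combo in vowel_combos:
--         abbrev = food
--         for vowel in combo:
--             abbrev = abbrev.replace(vowel, "", 1)
--         abbrev_options.append(abbrev)
--
--     # deal with any cases where the food is made plural
--     plural_food = food + "s"
--     abbrev_options.append(plural_food)
--
--     # return the combinations
--     return abbrev_options
-- ===== SOURCE B (Python) =====
-- def _pairs(vs):
--     """ordered pairs (vs[i], vs[j]) with i < j, in lexicographic index order"""
--     if not vs:
--         return []
--     head, tail = vs[0], vs[1:]
--     return [(head, w) for w in tail] + _pairs(tail)
--
--
-- def abbreviations(food):
--     """ creates a list of possible abbreviations for a food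
--     :param food: a string that is the name of a food
--     :return abbreviations: a list of possible abbreviations for that food
--     """
--     vowels = [c for c in food if c in "aeiou"]
--     singles = [food.replace(v, "", 1) for v in vowels]
--     doubles = [food.replace(v, "", 1).replace(w, "", 1) for v, w in _pairs(vowels)]
--     return [food] + singles + doubles + [food + "s"]
-- ===== Notes on version B (the rewrite author's own statement) =====
-- stated objective: faster
-- what changed: B enumerates only the empty, single-vowel and ordered-pair vowel choices directly (recursive pairs helper), instead of A's generation of all 2^n vowel subsets via chain/combinations followed by a size<=2 filter; intended as faster (probe measured B 351x at n=64, A timed out on larger inputs).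
import Mathlib
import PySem

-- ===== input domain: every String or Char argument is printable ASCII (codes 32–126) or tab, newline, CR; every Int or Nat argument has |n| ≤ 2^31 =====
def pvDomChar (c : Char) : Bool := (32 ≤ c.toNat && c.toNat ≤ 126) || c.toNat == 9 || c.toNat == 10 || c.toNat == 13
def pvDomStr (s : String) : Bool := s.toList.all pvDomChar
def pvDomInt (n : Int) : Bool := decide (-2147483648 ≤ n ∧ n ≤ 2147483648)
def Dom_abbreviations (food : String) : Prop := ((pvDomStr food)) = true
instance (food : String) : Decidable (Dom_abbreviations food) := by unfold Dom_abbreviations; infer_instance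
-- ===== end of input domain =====

-- B enumerates the empty, size-1 and size-2 vowel choices directly instead of all 2^n vowel subsets
-- filtered down to size ≤ 2; intended as faster (timing: B 351× at n=64, A timed out beyond that).

-- shared primitive: s.replace(v, "", 1) for a single character v — exact: removes the first
-- occurrence of v (if any), which is exactly Python's replace with count 1, old of length 1, new "".
def pvRemoveFirst : List Char → Char → List Char
  | [], _ => []
  | c :: rest, v => if c = v then rest else c :: pvRemoveFirst rest v

-- ===== PORT A =====
-- itertools.combinations(xs, r) in Python's order
def pyCombinations {α : Type} : Nat → List α → List (List α)
  | 0, _ => [[]]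
  | _ + 1, [] => []
  | r + 1, x :: xs => (pyCombinations r xs).map (fun c => x :: c) ++ pyCombinations (r + 1) xs

def abbreviations (food : String) : List String :=
  let vowelList : List Char := ['a', 'e', 'i', 'o', 'u']
  let vowels := food.toList.filter (fun c => c ∈ vowelList)
  let vowelCombos := (List.range (vowels.length + 1)).flatMap (fun r => pyCombinations r vowels)
  let vowelCombos := vowelCombos.filter (fun combo => combo.length ≤ 2)
  let abbrevOptions := vowelCombos.foldl (fun acc combo =>
    acc ++ [String.ofList (combo.foldl (fun ab v => pvRemoveFirst ab v) food.toList)]) []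
  let pluralFood := food ++ "s"
  abbrevOptions ++ [pluralFood]

-- ===== PORT B =====
-- _pairs: ordered pairs (vs[i], vs[j]) with i < j, recursion on the list
def pvPairs {α : Type} : List α → List (α × α)
  | [] => []
  | head :: tail => tail.map (fun w => (head, w)) ++ pvPairs tail

def abbreviations_alt (food : String) : List String :=
  let vowels := food.toList.filter (fun c => c ∈ "aeiou".toList)
  let singles := vowels.map (fun v => String.ofList (pvRemoveFirst food.toList v))
  let doubles := (pvPairs vowels).map (fun p => String.ofList (pvRemoveFirst (pvRemoveFirst food.toList p.1) p.2))
  [food] ++ singles ++ doubles ++ [food ++ "s"]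

-- ===== PRECONDITION & SPEC =====
def Spec_abbreviations (food : String) (out : List String) : Prop := out = abbreviations_alt food
instance (food : String) (out : List String) : Decidable (Spec_abbreviations food out) := by unfold Spec_abbreviations; infer_instance

-- ===== CLAIM (what is proved, stated in full; the proofs are below) =====
def Claim_equal_abbreviations : Prop := ∀ (food : String), Dom_abbreviations food → Spec_abbreviations food (abbreviations food)

-- ===== LEMMAS AND PROOFS =====

theorem pyCombinations_nil_of_lt {α : Type} : ∀ (xs : List α) (r : Nat), xs.length < r → pyCombinations r xs = [] := by
  intro xs
  induction xs with
  | nil => intro r h; cases r with | zero => omega | succ r => rfl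
  | cons x xs ih =>
    intro r h
    cases r with
    | zero => omega
    | succ r =>
      simp only [List.length_cons] at h
      simp [pyCombinations, ih r (by omega), ih (r + 1) (by omega)]

theorem length_mem_pyCombinations {α : Type} : ∀ (r : Nat) (xs : List α) (l : List α), l ∈ pyCombinations r xs → l.length = r := by
  intro r
  induction r with
  | zero => intro xs l h; simp [pyCombinations] at h; simp [h]
  | succ r ih =>
    intro xs l h
    induction xs with
    | nil => simp [pyCombinations] at h
    | cons x xs ihx =>
      simp only [pyCombinations, List.mem_append, List.mem_map] at h
      rcases h with ⟨c, hc, rfl⟩ | h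
      · simp [ih xs c hc]
      · exact ihx h

theorem filter_pyCombinations {α : Type} (r : Nat) (xs : List α) :
    (pyCombinations r xs).filter (fun combo => combo.length ≤ 2) =
      if r ≤ 2 then pyCombinations r xs else [] := by
  split
  · next h =>
    apply List.filter_eq_self.2
    intro l hl
    simp [length_mem_pyCombinations r xs l hl, h]
  · next h =>
    apply List.filter_eq_nil_iff.2
    intro l hl
    simp [length_mem_pyCombinations r xs l hl]
    omega

theorem pyCombinations_one {α : Type} (xs : List α) : pyCombinations 1 xs = xs.map (fun x => [x]) := by
  induction xs with
  | nil => rfl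
  | cons x xs ih => simp [pyCombinations, ih]

theorem pyCombinations_two {α : Type} (xs : List α) :
    pyCombinations 2 xs = (pvPairs xs).map (fun p => [p.1, p.2]) := by
  induction xs with
  | nil => rfl
  | cons x xs ih =>
    simp [pyCombinations, pvPairs, ih, pyCombinations_one, List.map_map, Function.comp]

theorem flatMap_range_three {α : Type} (f : Nat → List α) (h3 : ∀ r, 3 ≤ r → f r = []) :
    ∀ n, 2 ≤ n → (List.range (n + 1)).flatMap f = f 0 ++ f 1 ++ f 2 := by
  intro n
  induction n with
  | zero => omega
  | succ n ih =>
    intro h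
    rcases Nat.lt_or_ge n 2 with hn | hn
    · interval_cases n
      · omega
      · simp [List.range_succ]
    · rw [List.range_succ, List.flatMap_append, ih hn]
      simp [h3 (n + 1) (by omega)]

-- the filtered chain of all r-combinations is exactly combos of size 0, 1, 2
theorem combos_eq {α : Type} (v : List α) :
    ((List.range (v.length + 1)).flatMap (fun r => pyCombinations r v)).filter (fun combo => combo.length ≤ 2) =
      pyCombinations 0 v ++ pyCombinations 1 v ++ pyCombinations 2 v := by
  have hfil : ((List.range (v.length + 1)).flatMap (fun r => pyCombinations r v)).filter (fun combo => combo.length ≤ 2)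
      = (List.range (v.length + 1)).flatMap (fun r => if r ≤ 2 then pyCombinations r v else []) := by
    rw [List.filter_flatMap]
    refine List.flatMap_congr (fun r _ => ?_)
    simpa using filter_pyCombinations r v
  rw [hfil]
  rcases Nat.lt_or_ge v.length 2 with hn | hn
  · interval_cases h : v.length
    · rw [List.eq_nil_of_length_eq_zero h]; rfl
    · simp [List.range_succ,
        pyCombinations_nil_of_lt v 2 (by omega)]
  · rw [flatMap_range_three _ (fun r hr => by rw [if_neg (by omega)]) _ hn]
    norm_num

theorem foldl_append_singleton {α β : Type} (f : α → β) (l : List α) (acc : List β) :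
    l.foldl (fun acc x => acc ++ [f x]) acc = acc ++ l.map f := by
  induction l generalizing acc with
  | nil => simp
  | cons x xs ih => simp [List.foldl_cons, ih]

-- ===== VERDICT (by name: the statement is the Claim_ definition above) =====
theorem abbreviations_spec : Claim_equal_abbreviations := by
  intro food _
  unfold Spec_abbreviations abbreviations abbreviations_alt
  simp only
  rw [foldl_append_singleton, combos_eq, List.nil_append]
  have : ("aeiou".toList : List Char) = ['a', 'e', 'i', 'o', 'u'] := by decide
  rw [this]
  simp [pyCombinations, pyCombinations_one, pyCombinations_two, List.map_map, Function.comp_def,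
    List.foldl_cons, List.foldl_nil, String.ofList_toList]
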